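-- pv_equiv track=rewrite | github.com/Pistonite/botw-recipe | research/util.py | make_multichoose
-- ===== SOURCE A (Python) =====
-- NUM_INGR = 5
--
-- def make_multichoose(num_groups):
--     # bionmial(n, k), k<=NUM_INGR is bino[n][k]
--     bino = []
--     for _ in range(num_groups+NUM_INGR):
--         bino.append([0]*(NUM_INGR+1))
--     for n in range(num_groups+NUM_INGR):
--         bino[n][0] = 1
--
--     for k in range(NUM_INGR+1):
--         bino[k][k] = 1
--
--     for n in range(1,num_groups+NUM_INGR):
--         for k in range(1,NUM_INGR+1):
--             bino[n][k] = bino[n-1][k-1] + bino[n-1][k]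
--     # multichoose(n, k) is multichoose[n][k]
--     multichoose = []
--     for _ in range(num_groups+1):
--         multichoose.append([0]*(NUM_INGR+1))
--     for n in range(num_groups+1):
--         multichoose[n][0] = 1
--     for k in range(1, NUM_INGR+1):
--         for n in range(num_groups+1):
--             multichoose[n][k] = bino[n+k-1][k]
--     return multichoose
-- ===== SOURCE B (Python) =====
-- NUM_INGR = 5
--
-- def make_multichoose(num_groups):
--     # closed form: multichoose(n, k) = C(n+k-1, k), computed by the running-product formula
--     def comb(n, k):
--         r = 1
--         for i in range(1, k + 1):
--             r = r * (n - k + i) // i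
--         return r
--     return [[1] + [comb(n + k - 1, k) for k in range(1, NUM_INGR + 1)]
--             for n in range(num_groups + 1)]
-- ===== Notes on version B (the rewrite author's own statement) =====
-- stated objective: simpler
-- what changed: Replaced the Pascal-triangle binomial table and the three in-place fill loops by a direct closed form: each entry multichoose[n][k] is C(n+k-1,k) computed with the running-product binomial formula, built in one comprehension.
-- outside the precondition, e.g. on make_multichoose(0): A raises IndexError, B returns [[1, 0, 0, 0, 0, 0]]
import Mathlib
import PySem

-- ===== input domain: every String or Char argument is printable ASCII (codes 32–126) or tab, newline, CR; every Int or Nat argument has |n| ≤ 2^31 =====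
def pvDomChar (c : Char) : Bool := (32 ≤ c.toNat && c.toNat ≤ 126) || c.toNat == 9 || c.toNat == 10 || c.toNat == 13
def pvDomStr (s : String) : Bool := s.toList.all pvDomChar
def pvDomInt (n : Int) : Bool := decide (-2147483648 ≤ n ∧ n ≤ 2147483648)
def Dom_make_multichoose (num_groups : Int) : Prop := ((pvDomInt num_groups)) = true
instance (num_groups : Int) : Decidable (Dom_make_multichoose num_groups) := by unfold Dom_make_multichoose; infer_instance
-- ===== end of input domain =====

-- B replaces A's Pascal-triangle binomial table and in-place fill loops by the closed form
-- multichoose(n,k) = C(n+k-1,k) computed entry-wise with the running-product binomial formula (objective: simpler).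

-- ===== PORT A =====
-- bino[i][j] = v  (Python list-of-lists element assignment; in range under Pre_)
def pySet2 (b : List (List Int)) (i j : Nat) (v : Int) : List (List Int) :=
  b.set i ((b.getD i []).set j v)
-- bino[i][j]  (read; in range under Pre_)
def pyGet2 (b : List (List Int)) (i j : Nat) : Int :=
  (b.getD i []).getD j 0

def make_multichoose (num_groups : Int) : List (List Int) :=
  let rows := (num_groups + 5).toNat
  let bino0 := (List.range rows).foldl (fun b _ => b ++ [List.replicate 6 (0 : Int)]) []
  let bino1 := (List.range rows).foldl (fun b n => pySet2 b n 0 1) bino0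
  let bino2 := (List.range 6).foldl (fun b k => pySet2 b k k 1) bino1
  let bino := (List.range' 1 (rows - 1)).foldl (fun b n =>
      (List.range' 1 5).foldl (fun b k =>
        pySet2 b n k (pyGet2 b (n - 1) (k - 1) + pyGet2 b (n - 1) k)) b) bino2
  let mrows := (num_groups + 1).toNat
  let mc0 := (List.range mrows).foldl (fun m _ => m ++ [List.replicate 6 (0 : Int)]) []
  let mc1 := (List.range mrows).foldl (fun m n => pySet2 m n 0 1) mc0
  (List.range' 1 5).foldl (fun m k =>
      (List.range mrows).foldl (fun m n => pySet2 m n k (pyGet2 bino (n + k - 1) k)) m) mc1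

-- ===== PORT B =====
-- comb(n, k) of Source B: running product r = r*(n-k+i)//i for i = 1..k
def pyComb (n : Int) (k : Nat) : Int :=
  (List.range' 1 k).foldl (fun (r : Int) (i : Nat) => PySem.Int.floordiv (r * (n - (k : Int) + (i : Int))) (i : Int)) 1

def make_multichoose_alt (num_groups : Int) : List (List Int) :=
  (List.range (num_groups + 1).toNat).map (fun (n : Nat) =>
    1 :: (List.range' 1 5).map (fun (k : Nat) => pyComb ((n : Int) + (k : Int) - 1) k))

-- ===== PRECONDITION & SPEC =====
-- A raises IndexError for num_groups ≤ 0 (the diagonal writes bino[k][k]=1, k ≤ 5, overrun the table)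
def Pre_make_multichoose (num_groups : Int) : Prop := 1 ≤ num_groups
instance (num_groups : Int) : Decidable (Pre_make_multichoose num_groups) := by unfold Pre_make_multichoose; infer_instance
def pvWitness_make_multichoose : Int := 3

def Spec_make_multichoose (num_groups : Int) (out : List (List Int)) : Prop := out = make_multichoose_alt num_groups
instance (num_groups : Int) (out : List (List Int)) : Decidable (Spec_make_multichoose num_groups out) := by unfold Spec_make_multichoose; infer_instance

-- ===== CLAIM (what is proved, stated in full; the proofs are below) =====
def Claim_equal_make_multichoose : Prop := ∀ (num_groups : Int), Dom_make_multichoose num_groups → Pre_make_multichoose num_groups → Spec_make_multichoose num_groups (make_multichoose num_groups)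

-- ===== LEMMAS AND PROOFS =====

-- row values
def zrow : List Int := List.replicate 6 0
def row1 : List Int := [1, 0, 0, 0, 0, 0]
def chooseRow (n : Nat) : List Int :=
  [1, (n.choose 1 : Int), (n.choose 2 : Int), (n.choose 3 : Int), (n.choose 4 : Int), (n.choose 5 : Int)]
def mcRow (n : Nat) : List Int :=
  [1, (n.choose 1 : Int), ((n+1).choose 2 : Int), ((n+2).choose 3 : Int), ((n+3).choose 4 : Int), ((n+4).choose 5 : Int)]

-- proof-side staging of port A (definitionally equal to the port's lets)
def binoStage0 (R : Nat) : List (List Int) :=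
  (List.range R).foldl (fun b _ => b ++ [List.replicate 6 (0 : Int)]) []
def binoStage1 (R : Nat) : List (List Int) :=
  (List.range R).foldl (fun b n => pySet2 b n 0 1) (binoStage0 R)
def binoStage2 (R : Nat) : List (List Int) :=
  (List.range 6).foldl (fun b k => pySet2 b k k 1) (binoStage1 R)
def binoOf (R : Nat) : List (List Int) :=
  (List.range' 1 (R - 1)).foldl (fun b n =>
      (List.range' 1 5).foldl (fun b k =>
        pySet2 b n k (pyGet2 b (n - 1) (k - 1) + pyGet2 b (n - 1) k)) b) (binoStage2 R)
def mcStage1 (M : Nat) : List (List Int) :=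
  (List.range M).foldl (fun m n => pySet2 m n 0 1)
    ((List.range M).foldl (fun m _ => m ++ [List.replicate 6 (0 : Int)]) [])
def mcOf (M : Nat) (bino : List (List Int)) : List (List Int) :=
  (List.range' 1 5).foldl (fun m k =>
      (List.range M).foldl (fun m n => pySet2 m n k (pyGet2 bino (n + k - 1) k)) m) (mcStage1 M)

lemma portA_staged (x : Int) : make_multichoose x = mcOf (x + 1).toNat (binoOf (x + 5).toNat) := rfl

-- table invariant: b has M rows and row r reads as f r
def StEq (b : List (List Int)) (M : Nat) (f : Nat → List Int) : Prop :=
  b.length = M ∧ ∀ r, r < M → b.getD r [] = f r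

lemma getD_set_ne {α} (l : List α) {i j : Nat} (v d : α) (h : i ≠ j) :
    (l.set i v).getD j d = l.getD j d := by
  simp [List.getD, List.getElem?_set_ne h]

lemma getD_set_self {α} (l : List α) (i : Nat) (v d : α) (h : i < l.length) :
    (l.set i v).getD i d = v := by
  simp [List.getD, h]

lemma stEq_congr {b M f f'} (h : StEq b M f) (hf : ∀ r, r < M → f r = f' r) : StEq b M f' :=
  ⟨h.1, fun r hr => (h.2 r hr).trans (hf r hr)⟩

lemma stEq_set {b M f} (h : StEq b M f) (i : Nat) (hi : i < M) (j : Nat) (v : Int) :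
    StEq (pySet2 b i j v) M (fun r => if r = i then (f i).set j v else f r) := by
  refine ⟨by simp [pySet2, h.1], fun r hr => ?_⟩
  by_cases hri : r = i
  · subst hri
    rw [pySet2, getD_set_self _ _ _ _ (by rw [h.1]; exact hi), h.2 r hr]
    simp
  · rw [pySet2, getD_set_ne _ _ _ (fun he => hri he.symm), h.2 r hr]
    simp [hri]

lemma build_append (m : Nat) (x : List Int) (acc : List (List Int)) :
    (List.range m).foldl (fun b _ => b ++ [x]) acc = acc ++ List.replicate m x := by
  induction m generalizing acc with
  | zero => simp
  | succ n ih => simp [List.range_succ, ih, List.replicate_succ']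

lemma stEq_replicate (M : Nat) (x : List Int) : StEq (List.replicate M x) M (fun _ => x) := by
  refine ⟨by simp, fun r hr => ?_⟩
  simp [List.getD, List.getElem?_replicate, hr]

-- filling one column: mc[n][k] = g n for all n < t
lemma colFill (M k : Nat) (g : Nat → Int) (f : Nat → List Int) :
    ∀ (t : Nat), t ≤ M → ∀ b, StEq b M f →
      StEq ((List.range t).foldl (fun m n => pySet2 m n k (g n)) b) M
           (fun r => if r < t then (f r).set k (g r) else f r) := by
  intro t
  induction t with
  | zero => intro _ b hb; simpa using hb
  | succ t ih =>
    intro ht b hb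
    rw [List.range_succ, List.foldl_append]
    have h1 := stEq_set (ih (by omega) b hb) t (by omega) k (g t)
    refine stEq_congr h1 (fun r hr => ?_)
    by_cases hrt : r = t
    · subst hrt; simp
    · by_cases hlt : r < t <;> simp [hrt, hlt] <;> omega

lemma colFillFull (M k : Nat) (g : Nat → Int) (f : Nat → List Int) (b : List (List Int))
    (hb : StEq b M f) :
    StEq ((List.range M).foldl (fun m n => pySet2 m n k (g n)) b) M
         (fun r => (f r).set k (g r)) := by
  refine stEq_congr (colFill M k g f M le_rfl b hb) (fun r hr => by simp [hr])

-- diagonal fill bino[k][k] = 1 for k < 6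
def diagF (r : Nat) : List Int := if r < 6 then row1.set r 1 else row1

lemma diagFill (M : Nat) (h6 : 6 ≤ M) :
    ∀ t, t ≤ 6 → ∀ b, StEq b M (fun _ => row1) →
      StEq ((List.range t).foldl (fun b k => pySet2 b k k 1) b) M
           (fun r => if r < t then row1.set r 1 else row1) := by
  intro t
  induction t with
  | zero => intro _ b hb; simpa using hb
  | succ t ih =>
    intro ht b hb
    rw [List.range_succ, List.foldl_append]
    have h1 := stEq_set (ih (by omega) b hb) t (by omega) t 1
    refine stEq_congr h1 (fun r hr => ?_)
    by_cases hrt : r = t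
    · subst hrt; simp
    · by_cases hlt : r < t <;> simp [hrt, hlt] <;> omega

-- the inner Pascal update turns row n into chooseRow n
lemma pyGet2_pySet2_succ (b : List (List Int)) (m j : Nat) (v : Int) (j' : Nat) :
    pyGet2 (pySet2 b (m + 1) j v) m j' = pyGet2 b m j' := by
  simp [pyGet2, pySet2, getD_set_ne _ _ _ (by omega : m + 1 ≠ m)]

lemma stEq_set5 {b M f} (h : StEq b M f) (n : Nat) (hn : n < M) (v1 v2 v3 v4 v5 : Int) :
    StEq (pySet2 (pySet2 (pySet2 (pySet2 (pySet2 b n 1 v1) n 2 v2) n 3 v3) n 4 v4) n 5 v5) M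
         (fun r => if r = n then (((((f n).set 1 v1).set 2 v2).set 3 v3).set 4 v4).set 5 v5 else f r) := by
  have h1 := stEq_set h n hn 1 v1
  have h2 := stEq_set h1 n hn 2 v2
  have h3 := stEq_set h2 n hn 3 v3
  have h4 := stEq_set h3 n hn 4 v4
  have h5 := stEq_set h4 n hn 5 v5
  refine stEq_congr h5 (fun r hr => ?_)
  by_cases hrn : r = n <;> simp [hrn]

lemma innerStep (M : Nat) (b : List (List Int)) (f : Nat → List Int) (m : Nat)
    (hb : StEq b M f) (hn : m + 1 < M)
    (hprev : f m = chooseRow m)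
    (hcur : ∃ a1 a2 a3 a4 a5, f (m + 1) = [1, a1, a2, a3, a4, a5]) :
    StEq ((List.range' 1 5).foldl (fun b k =>
            pySet2 b (m + 1) k (pyGet2 b (m + 1 - 1) (k - 1) + pyGet2 b (m + 1 - 1) k)) b) M
         (fun r => if r = m + 1 then chooseRow (m + 1) else f r) := by
  obtain ⟨a1, a2, a3, a4, a5, hfn⟩ := hcur
  have hrow : b.getD m [] = chooseRow m := by
    rw [hb.2 m (by omega), hprev]
  have hread : ∀ j, pyGet2 b m j = (chooseRow m).getD j 0 := fun j => by
    simp only [pyGet2, hrow]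
  show StEq ((List.foldl _ b [1,2,3,4,5])) M _
  simp only [List.foldl_cons, List.foldl_nil, Nat.add_sub_cancel,
    pyGet2_pySet2_succ, hread]
  have h5 := stEq_set5 hb (m + 1) hn
    ((chooseRow m).getD 0 0 + (chooseRow m).getD 1 0)
    ((chooseRow m).getD 1 0 + (chooseRow m).getD 2 0)
    ((chooseRow m).getD 2 0 + (chooseRow m).getD 3 0)
    ((chooseRow m).getD 3 0 + (chooseRow m).getD 4 0)
    ((chooseRow m).getD 4 0 + (chooseRow m).getD 5 0)
  refine stEq_congr h5 (fun r hr => ?_)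
  by_cases hrn : r = m + 1
  · subst hrn
    simp only [if_pos rfl, hfn, chooseRow]
    simp [List.set, List.getD, Nat.choose_succ_succ m, Nat.choose_zero_right]
  · simp [hrn]

lemma diagF_shape (r : Nat) : ∃ a1 a2 a3 a4 a5, diagF r = [1, a1, a2, a3, a4, a5] := by
  unfold diagF
  by_cases h : r < 6
  · interval_cases r <;> exact ⟨_, _, _, _, _, rfl⟩
  · exact ⟨0, 0, 0, 0, 0, by rw [if_neg h]; rfl⟩

lemma mainFold (M : Nat) (h6 : 6 ≤ M) :
    ∀ t, t + 1 ≤ M → ∀ b, StEq b M diagF →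
      StEq ((List.range' 1 t).foldl (fun b n =>
              (List.range' 1 5).foldl (fun b k =>
                pySet2 b n k (pyGet2 b (n - 1) (k - 1) + pyGet2 b (n - 1) k)) b) b) M
           (fun r => if r ≤ t then chooseRow r else diagF r) := by
  intro t
  induction t with
  | zero =>
    intro _ b hb
    refine stEq_congr hb (fun r hr => ?_)
    by_cases h0 : r = 0
    · subst h0; simp [diagF, chooseRow, row1]
    · simp [show ¬ r ≤ 0 by omega]
  | succ t ih =>
    intro ht b hb
    have hcat : List.range' 1 (t + 1) = List.range' 1 t ++ [1 + t] := by
      simpa using (List.range'_concat (s := 1) (n := t) (step := 1))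
    rw [hcat, List.foldl_append, List.foldl_cons, List.foldl_nil]
    have hprev := ih (by omega) b hb
    have h1t : 1 + t = t + 1 := by omega
    rw [h1t]
    obtain ⟨a1, a2, a3, a4, a5, hsh⟩ := diagF_shape (t + 1)
    have hstep := innerStep M _ _ t hprev (by omega)
      (by simp) ⟨a1, a2, a3, a4, a5, by simp [show ¬ (t + 1) ≤ t by omega, hsh]⟩
    refine stEq_congr hstep (fun r hr => ?_)
    by_cases hrt : r = t + 1
    · simp [hrt]
    · by_cases hle : r ≤ t <;> simp [hrt, hle] <;> omega

lemma binoOf_spec (R : Nat) (h6 : 6 ≤ R) : StEq (binoOf R) R chooseRow := by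
  have h0 : StEq (binoStage0 R) R (fun _ => zrow) := by
    rw [binoStage0, build_append]
    simpa using stEq_replicate R zrow
  have h1 : StEq (binoStage1 R) R (fun _ => row1) := by
    have := colFillFull R 0 (fun _ => 1) (fun _ => zrow) (binoStage0 R) h0
    exact stEq_congr this (fun r hr => by simp [zrow, row1, List.set])
  have h2 : StEq (binoStage2 R) R diagF := by
    have := diagFill R h6 6 le_rfl (binoStage1 R) h1
    exact stEq_congr this (fun r hr => rfl)
  have h3 := mainFold R h6 (R - 1) (by omega) (binoStage2 R) h2
  refine stEq_congr h3 (fun r hr => by simp [show r ≤ R - 1 by omega])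

lemma stEq_eq_map {b : List (List Int)} {M : Nat} {f : Nat → List Int} (h : StEq b M f) :
    b = (List.range M).map f := by
  apply List.ext_getElem (by simp [h.1])
  intro i h1 h2
  have hgd := h.2 i (by simpa [h.1] using h1)
  rw [List.getD_eq_getElem?_getD, List.getElem?_eq_getElem h1] at hgd
  simpa using hgd

lemma chooseRow_getD (n j : Nat) (hj : j < 6) :
    (chooseRow n).getD j 0 = (n.choose j : Int) := by
  interval_cases j <;> simp [chooseRow]

lemma mcOf_spec (N : Nat) (bino : List (List Int)) (hb : StEq bino (N + 5) chooseRow) :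
    mcOf (N + 1) bino = (List.range (N + 1)).map mcRow := by
  have hg : ∀ k, 1 ≤ k → k ≤ 5 → ∀ n, n < N + 1 →
      pyGet2 bino (n + k - 1) k = ((n + k - 1).choose k : Int) := by
    intro k hk1 hk5 n hn
    have hlt : n + k - 1 < N + 5 := by omega
    rw [pyGet2, hb.2 _ hlt, chooseRow_getD _ _ (by omega)]
  have hmc1 : StEq (mcStage1 (N + 1)) (N + 1) (fun _ => row1) := by
    rw [mcStage1, build_append]
    have := colFillFull (N + 1) 0 (fun _ => 1) (fun _ => zrow) _
      (by simpa using stEq_replicate (N + 1) zrow)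
    exact stEq_congr this (fun r hr => by simp [zrow, row1, List.set])
  rw [mcOf]
  have hr5 : List.range' 1 5 = [1, 2, 3, 4, 5] := rfl
  rw [hr5]
  simp only [List.foldl_cons, List.foldl_nil]
  have s1 := colFillFull (N + 1) 1 (fun n => pyGet2 bino (n + 1 - 1) 1) _ _ hmc1
  have s2 := colFillFull (N + 1) 2 (fun n => pyGet2 bino (n + 2 - 1) 2) _ _ s1
  have s3 := colFillFull (N + 1) 3 (fun n => pyGet2 bino (n + 3 - 1) 3) _ _ s2
  have s4 := colFillFull (N + 1) 4 (fun n => pyGet2 bino (n + 4 - 1) 4) _ _ s3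
  have s5 := colFillFull (N + 1) 5 (fun n => pyGet2 bino (n + 5 - 1) 5) _ _ s4
  refine (stEq_eq_map s5).trans (List.map_congr_left (fun r hr => ?_))
  rw [List.mem_range] at hr
  beta_reduce
  rw [hg 1 (by omega) (by omega) r hr, hg 2 (by omega) (by omega) r hr,
      hg 3 (by omega) (by omega) r hr, hg 4 (by omega) (by omega) r hr,
      hg 5 (by omega) (by omega) r hr]
  simp only [row1, List.set]
  unfold mcRow
  norm_num

lemma pyComb_zero_aux (l : List Nat) (n k : Int) :
    l.foldl (fun (r : Int) (i : Nat) => PySem.Int.floordiv (r * (n - k + (i : Int))) (i : Int)) 0 = 0 := by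
  induction l with
  | nil => rfl
  | cons a l ih =>
    rw [List.foldl_cons]
    beta_reduce
    rw [zero_mul, show PySem.Int.floordiv 0 (a : Int) = 0 by simp [PySem.Int.floordiv]]
    exact ih

lemma pyComb_spec (m k : Nat) (h : k ≤ m + 1) : pyComb (m : Int) k = (m.choose k : Int) := by
  by_cases hk : k ≤ m
  · obtain ⟨d, rfl⟩ : ∃ d, m = d + k := ⟨m - k, by omega⟩
    suffices hs : ∀ j, j ≤ k →
        (List.range' 1 j).foldl
          (fun (r : Int) (i : Nat) => PySem.Int.floordiv (r * (((d + k : Nat) : Int) - (k : Int) + (i : Int))) (i : Int)) 1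
        = (((d + j).choose j : Nat) : Int) by
      rw [pyComb, hs k le_rfl]
    intro j
    induction j with
    | zero => simp
    | succ j ih =>
      intro hj
      rw [show List.range' 1 (j + 1) = List.range' 1 j ++ [1 + 1 * j] from
            (List.range'_concat (s := 1) (n := j) (step := 1)),
          List.foldl_append, List.foldl_cons, List.foldl_nil, ih (by omega)]
      beta_reduce
      have harg : (((d + k : Nat) : Int) - (k : Int) + ((1 + 1 * j : Nat) : Int))
          = ((d + j + 1 : Nat) : Int) := by push_cast; ring
      rw [harg]
      have hnat : (d + j).choose j * (d + j + 1) = (d + j + 1).choose (j + 1) * (1 + 1 * j) :=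
        calc (d + j).choose j * (d + j + 1) = (d + j + 1) * (d + j).choose j := Nat.mul_comm _ _
          _ = (d + j + 1).choose (j + 1) * (j + 1) := Nat.add_one_mul_choose_eq (d + j) j
          _ = (d + j + 1).choose (j + 1) * (1 + 1 * j) := by ring
      have hmul : (((d + j).choose j : Nat) : Int) * ((d + j + 1 : Nat) : Int)
          = (((d + j + 1).choose (j + 1) : Nat) : Int) * ((1 + 1 * j : Nat) : Int) := by
        exact_mod_cast congrArg (fun x : Nat => (x : Int)) hnat
      rw [PySem.Int.floordiv_eq_ediv_of_pos (by omega), hmul,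
          Int.mul_ediv_cancel _ (by omega)]
      norm_num [Nat.add_assoc]
  · have hk1 : k = m + 1 := by omega
    subst hk1
    rw [pyComb, List.range'_succ, List.foldl_cons]
    beta_reduce
    have hz : (1 : Int) * ((m : Int) - ((m + 1 : Nat) : Int) + ((1 : Nat) : Int)) = 0 := by
      push_cast; ring
    rw [hz, show PySem.Int.floordiv 0 ((1 : Nat) : Int) = 0 by simp [PySem.Int.floordiv],
        pyComb_zero_aux, Nat.choose_eq_zero_of_lt (by omega), Nat.cast_zero]

lemma alt_eval (N : Nat) : make_multichoose_alt (N : Int) = (List.range (N + 1)).map mcRow := by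
  unfold make_multichoose_alt
  rw [show ((N : Int) + 1).toNat = N + 1 by omega]
  refine List.map_congr_left (fun n hn => ?_)
  have hr5 : List.range' 1 5 = [1, 2, 3, 4, 5] := rfl
  rw [hr5]
  simp only [List.map_cons, List.map_nil]
  have e1 : ((n : Nat) : Int) + ((1 : Nat) : Int) - 1 = ((n : Nat) : Int) := by push_cast; ring
  have e2 : ((n : Nat) : Int) + ((2 : Nat) : Int) - 1 = ((n + 1 : Nat) : Int) := by push_cast; ring
  have e3 : ((n : Nat) : Int) + ((3 : Nat) : Int) - 1 = ((n + 2 : Nat) : Int) := by push_cast; ring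
  have e4 : ((n : Nat) : Int) + ((4 : Nat) : Int) - 1 = ((n + 3 : Nat) : Int) := by push_cast; ring
  have e5 : ((n : Nat) : Int) + ((5 : Nat) : Int) - 1 = ((n + 4 : Nat) : Int) := by push_cast; ring
  rw [e1, e2, e3, e4, e5,
      pyComb_spec n 1 (by omega), pyComb_spec (n + 1) 2 (by omega),
      pyComb_spec (n + 2) 3 (by omega), pyComb_spec (n + 3) 4 (by omega),
      pyComb_spec (n + 4) 5 (by omega)]
  rfl

theorem make_multichoose_spec : Claim_equal_make_multichoose := by
  intro num_groups _ hpre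
  unfold Spec_make_multichoose
  unfold Pre_make_multichoose at hpre
  lift num_groups to ℕ using (by omega) with N
  have hN : 1 ≤ N := by exact_mod_cast hpre
  rw [portA_staged, alt_eval]
  have hrows : ((N : Int) + 5).toNat = N + 5 := by omega
  have hmrows : ((N : Int) + 1).toNat = N + 1 := by omega
  rw [hrows, hmrows]
  exact mcOf_spec N _ (binoOf_spec (N + 5) (by omega))
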